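-- pv_equiv track=rewrite | github.com/JakeChrist/AutomatedDocumentation | parser_javascript.py | _module_docstring
-- ===== SOURCE A (Python) =====
-- from typing import Any, Dict, List, Tuple
--
-- def _clean_comment_lines(lines: List[str]) -> List[str]:
--     """Return ``lines`` stripped of JavaScript/TypeScript comment markers."""
--
--     cleaned: List[str] = []
--     for raw in lines:
--         text = raw.strip()
--         if not text:
--             cleaned.append("")
--             continue
--         if text.startswith("//"):
--             cleaned.append(text.lstrip("/ ").strip())
--             continue
--         # Remove block comment markers and leading asterisks as used in JSDoc.
--         text = text.lstrip("/* ").rstrip("*/ ").strip()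
--         if text.startswith("*"):
--             text = text.lstrip("* ").strip()
--         if text.endswith("*/"):
--             text = text.rstrip("*/ ").strip()
--         cleaned.append(text)
--     return cleaned
--
-- def _module_docstring(lines: List[str]) -> str:
--     doc_lines: List[str] = []
--     i = 0
--     while i < len(lines):
--         stripped = lines[i].strip()
--         if stripped == "":
--             if doc_lines:
--                 break
--             i += 1
--             continue
--         if stripped.startswith("//"):
--             doc_lines.append(lines[i])
--             i += 1
--             continue
--         if stripped.startswith("/*"):
--             block: List[str] = [lines[i]]
--             if "*/" in stripped:
--                 i += 1
--             else:
--                 i += 1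
--                 while i < len(lines):
--                     block.append(lines[i])
--                     if "*/" in lines[i]:
--                         i += 1
--                         break
--                     i += 1
--             doc_lines.extend(block)
--             break
--         break
--
--     cleaned = [line for line in _clean_comment_lines(doc_lines) if line]
--     return "\n".join(cleaned).strip()
-- ===== SOURCE B (Python) =====
-- from typing import List
--
--
-- def _clean_comment_lines(lines: List[str]) -> List[str]:
--     """Return ``lines`` stripped of JavaScript/TypeScript comment markers."""
--     cleaned: List[str] = []
--     for raw in lines:
--         text = raw.strip()
--         if not text:
--             cleaned.append("")
--             continue
--         if text.startswith("//"):
--             cleaned.append(text.lstrip("/ ").strip())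
--             continue
--         text = text.lstrip("/* ").rstrip("*/ ").strip()
--         if text.startswith("*"):
--             text = text.lstrip("* ").strip()
--         if text.endswith("*/"):
--             text = text.rstrip("*/ ").strip()
--         cleaned.append(text)
--     return cleaned
--
--
-- def _module_docstring(lines: List[str]) -> str:
--     # Compute the doc region [start:end] by index searches, then slice once.
--     n = len(lines)
--     stripped = [l.strip() for l in lines]
--     # start: first non-blank line (n if none).
--     start = next((i for i, s in enumerate(stripped) if s), n)
--     # j: first index >= start that is not a '//' line (end of the '//' run).
--     j = next((i for i in range(start, n) if not stripped[i].startswith("//")), n)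
--     # end: extend over one '/*' block at j, if present.
--     if j < n and stripped[j].startswith("/*"):
--         if "*/" in stripped[j]:
--             end = j + 1
--         else:
--             end = next((j + 2 + t for t, l in enumerate(lines[j + 1:]) if "*/" in l), n)
--     else:
--         end = j
--     cleaned = [s for s in _clean_comment_lines(lines[start:end]) if s]
--     return "\n".join(cleaned).strip()
-- ===== Notes on version B (the rewrite author's own statement) =====
-- stated objective: alternative
-- what changed: A's accumulate-while-scanning while-loop (index mutation, doc_lines appends, break/continue) is replaced by computing the doc region's boundary indices (start of first non-blank, end of the '//' run, optional end of one '/*' block) via generator searches over a pre-stripped list and taking a single slice lines[start:end]; no list is accumulated during the scan.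
import Mathlib
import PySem

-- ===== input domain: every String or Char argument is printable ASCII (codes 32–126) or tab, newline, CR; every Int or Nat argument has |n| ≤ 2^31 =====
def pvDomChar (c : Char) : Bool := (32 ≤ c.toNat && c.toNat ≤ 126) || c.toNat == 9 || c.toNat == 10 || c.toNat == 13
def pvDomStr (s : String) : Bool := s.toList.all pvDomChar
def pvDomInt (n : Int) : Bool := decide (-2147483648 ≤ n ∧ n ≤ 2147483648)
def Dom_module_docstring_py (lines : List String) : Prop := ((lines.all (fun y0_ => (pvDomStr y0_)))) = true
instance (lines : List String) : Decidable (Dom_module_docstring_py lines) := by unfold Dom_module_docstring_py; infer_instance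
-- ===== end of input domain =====

-- B replaces A's accumulate-while-scanning loop by computing the doc region's boundary indices
-- (start / end of the '//' run / end of one '/*' block) via searches over a pre-stripped list and
-- taking a single slice; return values are proved equal on all inputs.

-- shared primitive helpers (Python str.lstrip(chars)/str.rstrip(chars); exact: drop from the
-- left/right while the character is one of `chars`)
def pvLstrip (s chars : String) : String :=
  String.ofList (s.toList.dropWhile (fun c => chars.toList.contains c))

def pvRstrip (s chars : String) : String :=
  String.ofList ((s.toList.reverse.dropWhile (fun c => chars.toList.contains c)).reverse)

-- the body of _clean_comment_lines for one line (the cleaner helper is identical in A and B)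
def pvCleanLine (raw : String) : String :=
  let text := PySem.Str.strip raw
  if text = "" then ""
  else if PySem.Str.startswith text "//" then
    PySem.Str.strip (pvLstrip text "/ ")
  else
    let text := PySem.Str.strip (pvRstrip (pvLstrip text "/* ") "*/ ")
    let text := if PySem.Str.startswith text "*" then PySem.Str.strip (pvLstrip text "* ") else text
    if PySem.Str.endswith text "*/" then PySem.Str.strip (pvRstrip text "*/ ") else text

-- _clean_comment_lines: a loop appending the cleaned form of each line (helper of both A and B)
def pvCleanLines (lines : List String) : List String :=
  lines.foldl (fun cleaned raw => cleaned ++ [pvCleanLine raw]) []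

-- ===== PORT A =====
-- A's inner while over the block: append each line, stop right after the first with "*/"
def pvTakeBlock : List String → List String
  | [] => []
  | l :: rest => if PySem.Str.isIn "*/" l then [l] else l :: pvTakeBlock rest

-- A's main while-loop over index i with accumulator doc_lines
def pvGoA : List String → List String → List String
  | [], doc => doc
  | l :: rest, doc =>
    let stripped := PySem.Str.strip l
    if stripped = "" then
      if doc = [] then pvGoA rest doc else doc
    else if PySem.Str.startswith stripped "//" then
      pvGoA rest (doc ++ [l])
    else if PySem.Str.startswith stripped "/*" then
      if PySem.Str.isIn "*/" stripped then doc ++ [l]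
      else doc ++ l :: pvTakeBlock rest
    else doc

def module_docstring_py (lines : List String) : String :=
  let docLines := pvGoA lines []
  let cleaned := (pvCleanLines docLines).filter (fun line => line ≠ "")
  PySem.Str.strip (PySem.Str.join "\n" cleaned)

-- ===== PORT B =====
-- B computes boundary indices and slices once; the `next(generator, default)` searches are
-- ported as List.findIdx? with the Python default in the none case (the range(start,n)/lines[j+1:]
-- searches via drop with the index offset added back).
def module_docstring_py_alt (lines : List String) : String :=
  let n := lines.length
  let stripped := lines.map PySem.Str.strip
  let start := (stripped.findIdx? (fun s => s != "")).getD n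
  let j := match (stripped.drop start).findIdx? (fun s => !PySem.Str.startswith s "//") with
           | some t => start + t
           | none => n
  let e :=
    if j < n ∧ PySem.Str.startswith (stripped.getD j "") "/*" then
      if PySem.Str.isIn "*/" (stripped.getD j "") then j + 1
      else match (lines.drop (j + 1)).findIdx? (fun l => PySem.Str.isIn "*/" l) with
           | some t => j + 2 + t
           | none => n
    else j
  let doc := PySem.List.slice lines (some (start : Int)) (some (e : Int))
  let cleaned := (pvCleanLines doc).filter (fun s => s ≠ "")
  PySem.Str.strip (PySem.Str.join "\n" cleaned)

-- ===== PRECONDITION & SPEC =====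
def Spec_module_docstring_py (lines : List String) (out : String) : Prop := out = module_docstring_py_alt lines
instance (lines : List String) (out : String) : Decidable (Spec_module_docstring_py lines out) := by unfold Spec_module_docstring_py; infer_instance

-- ===== CLAIM (what is proved, stated in full; the proofs are below) =====
def Claim_equal_module_docstring_py : Prop := ∀ (lines : List String), Dom_module_docstring_py lines → Spec_module_docstring_py lines (module_docstring_py lines)

-- ===== LEMMAS AND PROOFS =====

-- the doc region once leading blanks are gone: '//' run, then possibly one '/*' block
def pvPhase : List String → List String
  | [] => []
  | l :: rest =>
    let s := PySem.Str.strip l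
    if PySem.Str.startswith s "//" then l :: pvPhase rest
    else if PySem.Str.startswith s "/*" then
      if PySem.Str.isIn "*/" s then [l] else l :: pvTakeBlock rest
    else []

def pvSkipBlanks : List String → List String
  | [] => []
  | l :: rest => if PySem.Str.strip l = "" then pvSkipBlanks rest else l :: rest

lemma pvGoA_nonempty (lines : List String) :
    ∀ doc : List String, doc ≠ [] → pvGoA lines doc = doc ++ pvPhase lines := by
  induction lines with
  | nil => intro doc _; simp [pvGoA, pvPhase]
  | cons l rest ih =>
    intro doc hdoc
    unfold pvGoA pvPhase
    by_cases hs : PySem.Str.strip l = ""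
    · rw [if_pos hs, if_neg hdoc]
      have h1 : PySem.Str.startswith (PySem.Str.strip l) "//" = false := by rw [hs]; rfl
      have h2 : PySem.Str.startswith (PySem.Str.strip l) "/*" = false := by rw [hs]; rfl
      simp only [h1, h2, Bool.false_eq_true, if_false]
      simp
    · rw [if_neg hs]
      by_cases h1 : PySem.Str.startswith (PySem.Str.strip l) "//"
      · rw [if_pos h1, if_pos h1, ih (doc ++ [l]) (by simp)]
        simp
      · rw [if_neg h1, if_neg h1]
        split_ifs <;> simp

lemma pvGoA_eq_phase_skip (lines : List String) :
    pvGoA lines [] = pvPhase (pvSkipBlanks lines) := by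
  induction lines with
  | nil => rfl
  | cons l rest ih =>
    by_cases hs : PySem.Str.strip l = ""
    · have e1 : pvGoA (l :: rest) [] = pvGoA rest [] := by
        conv_lhs => unfold pvGoA
        rw [if_pos hs, if_pos rfl]
      have e2 : pvSkipBlanks (l :: rest) = pvSkipBlanks rest := by
        conv_lhs => unfold pvSkipBlanks
        rw [if_pos hs]
      rw [e1, e2, ih]
    · have e2 : pvSkipBlanks (l :: rest) = l :: rest := by
        unfold pvSkipBlanks; rw [if_neg hs]
      rw [e2]
      unfold pvGoA pvPhase
      rw [if_neg hs]
      by_cases h1 : PySem.Str.startswith (PySem.Str.strip l) "//"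
      · rw [if_pos h1, if_pos h1, List.nil_append, pvGoA_nonempty rest [l] (by simp)]
        rfl
      · rw [if_neg h1, if_neg h1]
        split_ifs <;> simp

-- B's end-of-region index relative to the blank-skipped list
def pvERel (ls : List String) : Nat :=
  let r := ((ls.map PySem.Str.strip).findIdx? (fun s => !PySem.Str.startswith s "//")).getD ls.length
  if r < ls.length ∧ PySem.Str.startswith ((ls.map PySem.Str.strip).getD r "") "/*" then
    if PySem.Str.isIn "*/" ((ls.map PySem.Str.strip).getD r "") then r + 1
    else match (ls.drop (r + 1)).findIdx? (fun t => PySem.Str.isIn "*/" t) with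
         | some t => r + 2 + t
         | none => ls.length
  else r

lemma pvTakeBlock_eq (t : List String) :
    pvTakeBlock t = (match t.findIdx? (fun l => PySem.Str.isIn "*/" l) with
                     | some u => t.take (u + 1)
                     | none => t) := by
  induction t with
  | nil => rfl
  | cons l rest ih =>
    unfold pvTakeBlock
    rw [List.findIdx?_cons]
    by_cases h : PySem.Str.isIn "*/" l
    · rw [if_pos h, if_pos h]
      rfl
    · rw [if_neg h, if_neg h, ih]
      cases hr : rest.findIdx? (fun l => PySem.Str.isIn "*/" l) with
      | some u => simp only [hr, Option.map_some, List.take_succ_cons]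
      | none => simp only [hr, Option.map_none]

lemma pvSkipBlanks_eq_drop (lines : List String) :
    pvSkipBlanks lines =
      lines.drop (((lines.map PySem.Str.strip).findIdx? (fun s => s != "")).getD lines.length) := by
  induction lines with
  | nil => rfl
  | cons l rest ih =>
    rw [List.map_cons, List.findIdx?_cons]
    by_cases hs : PySem.Str.strip l = ""
    · have : (PySem.Str.strip l != "") = false := by rw [hs]; rfl
      rw [this]
      simp only [Bool.false_eq_true, if_false]
      unfold pvSkipBlanks
      rw [if_pos hs, ih]
      cases hr : (rest.map PySem.Str.strip).findIdx? (fun s => s != "") <;> simp [hr]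
    · have : (PySem.Str.strip l != "") = true := by simp only [bne_iff_ne, ne_eq]; exact hs
      rw [this]
      unfold pvSkipBlanks
      rw [if_neg hs]
      simp

lemma pvERel_take (ls : List String) : ls.take (pvERel ls) = pvPhase ls := by
  induction ls with
  | nil => rfl
  | cons l t ih =>
    by_cases h1 : PySem.Str.startswith (PySem.Str.strip l) "//"
    · have he : pvERel (l :: t) = pvERel t + 1 := by
        unfold pvERel
        rw [List.map_cons, List.findIdx?_cons]
        have hp : (!PySem.Str.startswith (PySem.Str.strip l) "//") = false := by rw [h1]; rfl
        rw [hp]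
        simp only [Bool.false_eq_true, if_false]
        cases hr : (t.map PySem.Str.strip).findIdx? (fun s => !PySem.Str.startswith s "//") with
        | some r =>
          simp only [hr, Option.map_some, Option.getD_some, List.length_cons]
          have hlt : r + 1 < t.length + 1 ↔ r < t.length := by omega
          rw [List.getD_cons_succ, List.drop_succ_cons]
          by_cases hc : r < t.length ∧
              PySem.Str.startswith ((t.map PySem.Str.strip).getD r "") "/*"
          · rw [if_pos ⟨hlt.mpr hc.1, hc.2⟩, if_pos hc]
            by_cases ht : PySem.Str.isIn "*/" ((t.map PySem.Str.strip).getD r "")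
            · rw [if_pos ht, if_pos ht]
            · rw [if_neg ht, if_neg ht]
              cases hb : (t.drop (r + 1)).findIdx? (fun l => PySem.Str.isIn "*/" l) <;>
                simp [hb] <;> omega
          · rw [if_neg (fun h => hc ⟨hlt.mp h.1, h.2⟩), if_neg hc]
        | none =>
          simp only [hr, Option.map_none, Option.getD_none, List.length_cons]
          have h₂ : ¬ (t.length + 1 < t.length + 1 ∧
              PySem.Str.startswith (((PySem.Str.strip l) :: t.map PySem.Str.strip).getD (t.length+1) "") "/*") := by
            intro h; omega
          have h₃ : ¬ (t.length < t.length ∧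
              PySem.Str.startswith ((t.map PySem.Str.strip).getD t.length "") "/*") := by
            intro h; omega
          rw [if_neg h₂, if_neg h₃]
      rw [he, List.take_succ_cons, ih]
      conv_rhs => unfold pvPhase
      rw [if_pos h1]
    · have hr0 : ((l :: t).map PySem.Str.strip).findIdx?
          (fun s => !PySem.Str.startswith s "//") = some 0 := by
        rw [List.map_cons, List.findIdx?_cons]
        have hx : PySem.Str.startswith (PySem.Str.strip l) "//" = false := by
          revert h1; cases PySem.Str.startswith (PySem.Str.strip l) "//" <;> simp
        rw [hx]
        rfl
      conv_rhs => unfold pvPhase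
      rw [if_neg h1]
      unfold pvERel
      rw [hr0]
      simp only [Option.getD_some, List.length_cons, List.map_cons, List.getD_cons_zero,
        List.drop_succ_cons, List.drop_zero]
      by_cases h2 : PySem.Str.startswith (PySem.Str.strip l) "/*"
      · rw [if_pos ⟨by omega, h2⟩, if_pos h2]
        by_cases h3 : PySem.Str.isIn "*/" (PySem.Str.strip l)
        · rw [if_pos h3, if_pos h3]
          rfl
        · rw [if_neg h3, if_neg h3, pvTakeBlock_eq]
          cases hb : t.findIdx? (fun l => PySem.Str.isIn "*/" l) with
          | some u =>
            have : 0 + 2 + u = (u + 1) + 1 := by omega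
            simp [this]
          | none => simp [List.take_succ_cons, List.take_length]
      · rw [if_neg (by intro h; exact h2 h.2), if_neg h2]
        simp

lemma pvFindIdx?_lt {l : List String} {p : String → Bool} {i : Nat}
    (h : l.findIdx? p = some i) : i < l.length := by
  induction l generalizing i with
  | nil => simp at h
  | cons a t ih =>
    rw [List.findIdx?_cons] at h
    by_cases hp : p a
    · rw [if_pos hp] at h; cases h; simp
    · rw [if_neg hp] at h
      cases hf : t.findIdx? p with
      | some u => rw [hf] at h; simp at h; subst h; have := ih hf; simp; omega
      | none => rw [hf] at h; simp at h

-- B's boundary indices, named for the proofs (definitionally the port's let-bound values)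
def pvStartIdx (lines : List String) : Nat :=
  (((lines.map PySem.Str.strip).findIdx? (fun s => s != "")).getD lines.length)

def pvJIdx (lines : List String) : Nat :=
  match ((lines.map PySem.Str.strip).drop (pvStartIdx lines)).findIdx?
      (fun s => !PySem.Str.startswith s "//") with
  | some t => pvStartIdx lines + t
  | none => lines.length

def pvEndIdx (lines : List String) : Nat :=
  if pvJIdx lines < lines.length ∧
      PySem.Str.startswith ((lines.map PySem.Str.strip).getD (pvJIdx lines) "") "/*" then
    if PySem.Str.isIn "*/" ((lines.map PySem.Str.strip).getD (pvJIdx lines) "") then pvJIdx lines + 1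
    else match (lines.drop (pvJIdx lines + 1)).findIdx? (fun l => PySem.Str.isIn "*/" l) with
         | some t => pvJIdx lines + 2 + t
         | none => lines.length
  else pvJIdx lines

lemma pvAlt_unfold (lines : List String) :
    module_docstring_py_alt lines =
      PySem.Str.strip (PySem.Str.join "\n"
        ((pvCleanLines (PySem.List.slice lines (some (pvStartIdx lines : Int))
          (some (pvEndIdx lines : Int)))).filter (fun s => s ≠ ""))) := rfl

lemma pvBDoc_eq (lines : List String) :
    PySem.List.slice lines (some (pvStartIdx lines : Int)) (some (pvEndIdx lines : Int)) =
      pvPhase (pvSkipBlanks lines) := by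
  have hrest : lines.drop (pvStartIdx lines) = pvSkipBlanks lines := by
    unfold pvStartIdx; exact (pvSkipBlanks_eq_drop lines).symm
  set rest := pvSkipBlanks lines with hrestdef
  have hstart_le : pvStartIdx lines ≤ lines.length := by
    unfold pvStartIdx
    cases hf : (lines.map PySem.Str.strip).findIdx? (fun s => s != "") with
    | some i =>
      have hlt := pvFindIdx?_lt hf
      simp only [hf, Option.getD_some]
      simp at hlt
      omega
    | none => simp [hf]
  have hlenrest : pvStartIdx lines + rest.length = lines.length := by
    rw [← hrest, List.length_drop]; omega
  have hSdrop : (lines.map PySem.Str.strip).drop (pvStartIdx lines) = rest.map PySem.Str.strip := by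
    rw [← List.map_drop, hrest]
  set r := (((rest.map PySem.Str.strip).findIdx? (fun s => !PySem.Str.startswith s "//")).getD
      rest.length) with hrdef
  have hJ : pvJIdx lines = pvStartIdx lines + r := by
    unfold pvJIdx
    rw [hSdrop, hrdef]
    cases hf : (rest.map PySem.Str.strip).findIdx? (fun s => !PySem.Str.startswith s "//") with
    | some t => simp [hf]
    | none => simp [hf]; omega
  have hgd : (lines.map PySem.Str.strip).getD (pvStartIdx lines + r) "" =
      (rest.map PySem.Str.strip).getD r "" := by
    rw [List.getD_eq_getElem?_getD, List.getD_eq_getElem?_getD, ← hSdrop, List.getElem?_drop]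
  have hdrop1 : lines.drop (pvStartIdx lines + r + 1) = rest.drop (r + 1) := by
    rw [← hrest, List.drop_drop, Nat.add_assoc]
  have he : pvEndIdx lines = pvStartIdx lines + pvERel rest := by
    unfold pvEndIdx pvERel
    rw [hJ, hgd, hdrop1, ← hrdef]
    by_cases hc : r < rest.length ∧ PySem.Str.startswith ((rest.map PySem.Str.strip).getD r "") "/*"
    · rw [if_pos ⟨by omega, hc.2⟩, if_pos hc]
      by_cases h3 : PySem.Str.isIn "*/" ((rest.map PySem.Str.strip).getD r "")
      · rw [if_pos h3, if_pos h3]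
        omega
      · rw [if_neg h3, if_neg h3]
        cases hb : (rest.drop (r + 1)).findIdx? (fun l => PySem.Str.isIn "*/" l) <;>
          simp only [hb] <;> omega
    · rw [if_neg (fun h => hc ⟨by omega, h.2⟩), if_neg hc]
  rw [he, PySem.List.slice_natCast, hrest]
  have harith : pvStartIdx lines + pvERel rest - pvStartIdx lines = pvERel rest := by omega
  rw [harith, pvERel_take]

-- ===== VERDICT (by name: the statement is the Claim_ definition above) =====
theorem module_docstring_py_spec : Claim_equal_module_docstring_py := by
  intro lines _
  unfold Spec_module_docstring_py module_docstring_py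
  rw [pvAlt_unfold, pvBDoc_eq, pvGoA_eq_phase_skip]
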